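-- pv_equiv track=rewrite | github.com/swastik-nandy/Docs-chatbot | backend/rag/ingestion/chunking/engine/detectors/structure.py | detect_structure
-- ===== SOURCE A (Python) =====
-- from typing import Dict, Any, List
--
-- def detect_structure(content: List[Dict[str, Any]]) -> Dict[str, bool]:
--     """
--     Detect structural signals from content blocks.
--
--     Principles:
--     - no domain assumptions
--     - only rely on normalized block types
--     - fast + predictable
--     """
--
--     if not content:
--         return _empty_structure()
--
--     has_code = False
--     has_table = False
--     has_list = False
--     has_paragraph = False
--
--     for item in content:
--         if not item:
--             continue
--
--         t = item.get("type")
--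
--         if t == "code":
--             has_code = True
--
--         elif t in {"table", "generic_table"}:
--             has_table = True
--
--         elif t == "list":
--             has_list = True
--
--         elif t == "paragraph":
--             has_paragraph = True
--
--         # 🔥 early exit (micro-optimization)
--         if has_code and has_table and has_list and has_paragraph:
--             break
--
--     return {
--         "has_code": has_code,
--         "has_table": has_table,
--         "has_list": has_list,
--         "has_paragraph": has_paragraph,
--     }
--
-- def _empty_structure() -> Dict[str, bool]:
--     return {
--         "has_code": False,
--         "has_table": False,
--         "has_list": False,
--         "has_paragraph": False,
--     }
-- ===== SOURCE B (Python) =====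
-- def detect_structure(content):
--     return {
--         "has_code": any(item and item.get("type") == "code" for item in content),
--         "has_table": any(item and item.get("type") in ("table", "generic_table") for item in content),
--         "has_list": any(item and item.get("type") == "list" for item in content),
--         "has_paragraph": any(item and item.get("type") == "paragraph" for item in content),
--     }
-- ===== Notes on version B (the rewrite author's own statement) =====
-- stated objective: simpler
-- what changed: Replaces the single stateful pass with four flags and an early-exit break by four independent short-circuiting any() scans, one per block type, with no mutable state and no empty-input guard (any() over an empty list is already False).
import Mathlib
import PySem

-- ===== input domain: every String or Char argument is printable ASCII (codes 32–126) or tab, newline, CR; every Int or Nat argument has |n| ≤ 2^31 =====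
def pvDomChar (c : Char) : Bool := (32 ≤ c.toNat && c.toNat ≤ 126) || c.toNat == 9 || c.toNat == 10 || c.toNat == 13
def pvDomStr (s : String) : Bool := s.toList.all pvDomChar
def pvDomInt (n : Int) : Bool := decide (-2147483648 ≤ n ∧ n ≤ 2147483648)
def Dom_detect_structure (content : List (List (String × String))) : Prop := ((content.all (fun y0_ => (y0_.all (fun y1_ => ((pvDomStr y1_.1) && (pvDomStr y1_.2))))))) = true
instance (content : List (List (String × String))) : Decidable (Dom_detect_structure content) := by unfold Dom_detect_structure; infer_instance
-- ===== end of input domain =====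

-- B replaces A's stateful four-flag loop with early exit by four independent short-circuiting any-scans, one per block type (objective: simpler).

-- ===== PORT A =====
-- the for-loop: carries the four flags, 'continue' on falsy item, early exit when all flags set
def detectLoopA : List (List (String × String)) → Bool → Bool → Bool → Bool → Bool × Bool × Bool × Bool
  | [], c, t, l, p => (c, t, l, p)
  | item :: rest, c, t, l, p =>
    if item = [] then detectLoopA rest c t l p
    else
      let ty := PySem.Dict.get? (PySem.Dict.mk item) "type"
      let c' := if ty = some "code" then true else c
      let t' := if ty ≠ some "code" ∧ (ty = some "table" ∨ ty = some "generic_table") then true else t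
      let l' := if ty ≠ some "code" ∧ ¬(ty = some "table" ∨ ty = some "generic_table") ∧ ty = some "list" then true else l
      let p' := if ty ≠ some "code" ∧ ¬(ty = some "table" ∨ ty = some "generic_table") ∧ ty ≠ some "list" ∧ ty = some "paragraph" then true else p
      if c' && t' && l' && p' then (c', t', l', p')
      else detectLoopA rest c' t' l' p'

def emptyStructureA : List (String × Bool) :=
  [("has_code", false), ("has_table", false), ("has_list", false), ("has_paragraph", false)]

def detect_structure (content : List (List (String × String))) : List (String × Bool) :=
  if content = [] then emptyStructureA
  else
    let r := detectLoopA content false false false false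
    [("has_code", r.1), ("has_table", r.2.1), ("has_list", r.2.2.1), ("has_paragraph", r.2.2.2)]

-- ===== PORT B =====
-- each dict entry is its own independent any-scan over content, as in Source B
def detect_structure_alt (content : List (List (String × String))) : List (String × Bool) :=
  [("has_code",
      content.any (fun item => item ≠ [] && decide (PySem.Dict.get? (PySem.Dict.mk item) "type" = some "code"))),
   ("has_table",
      content.any (fun item => item ≠ [] &&
        (decide (PySem.Dict.get? (PySem.Dict.mk item) "type" = some "table") ||
         decide (PySem.Dict.get? (PySem.Dict.mk item) "type" = some "generic_table")))),
   ("has_list",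
      content.any (fun item => item ≠ [] && decide (PySem.Dict.get? (PySem.Dict.mk item) "type" = some "list"))),
   ("has_paragraph",
      content.any (fun item => item ≠ [] && decide (PySem.Dict.get? (PySem.Dict.mk item) "type" = some "paragraph")))]

-- ===== PRECONDITION & SPEC =====
def Spec_detect_structure (content : List (List (String × String))) (out : List (String × Bool)) : Prop := out = detect_structure_alt content
instance (content : List (List (String × String))) (out : List (String × Bool)) : Decidable (Spec_detect_structure content out) := by unfold Spec_detect_structure; infer_instance

-- ===== CLAIM (what is proved, stated in full; the proofs are below) =====
def Claim_equal_detect_structure : Prop := ∀ (content : List (List (String × String))), Dom_detect_structure content → Spec_detect_structure content (detect_structure content)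

-- ===== LEMMAS AND PROOFS =====

-- whether some non-falsy item in content has type ty
def hasTy (content : List (List (String × String))) (ty : Option String) : Bool :=
  content.any (fun item => item ≠ [] && decide (PySem.Dict.get? (PySem.Dict.mk item) "type" = ty))

lemma any_table_split (content : List (List (String × String))) :
    content.any (fun item => item ≠ [] &&
        (decide (PySem.Dict.get? (PySem.Dict.mk item) "type" = some "table") ||
         decide (PySem.Dict.get? (PySem.Dict.mk item) "type" = some "generic_table")))
      = (hasTy content (some "table") || hasTy content (some "generic_table")) := by
  rw [Bool.eq_iff_iff]
  simp [hasTy, List.any_eq_true, Bool.and_eq_true, decide_eq_true_eq]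
  constructor
  · rintro ⟨item, h1, h2, h3 | h3⟩
    · exact Or.inl ⟨item, h1, h2, h3⟩
    · exact Or.inr ⟨item, h1, h2, h3⟩
  · rintro (⟨item, h1, h2, h3⟩ | ⟨item, h1, h2, h3⟩)
    · exact ⟨item, h1, h2, Or.inl h3⟩
    · exact ⟨item, h1, h2, Or.inr h3⟩

lemma detectLoopA_eq (content : List (List (String × String))) :
    ∀ c t l p, detectLoopA content c t l p =
      (c || hasTy content (some "code"),
       t || (hasTy content (some "table") || hasTy content (some "generic_table")),
       l || hasTy content (some "list"),
       p || hasTy content (some "paragraph")) := by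
  induction content with
  | nil => intro c t l p; simp [detectLoopA, hasTy]
  | cons item rest ih =>
    intro c t l p
    by_cases hemp : item = []
    · simp [detectLoopA, hemp, ih, hasTy]
    · have hT : ∀ x : Option String, hasTy (item :: rest) x
          = (decide (PySem.Dict.get? (PySem.Dict.mk item) "type" = x) || hasTy rest x) := by
        intro x; simp [hasTy, hemp]
      simp only [detectLoopA]
      rw [if_neg hemp]
      set ty := PySem.Dict.get? (PySem.Dict.mk item) "type" with hty
      have e1 : (if ty = some "code" then true else c) = (c || decide (ty = some "code")) := by
        by_cases h : ty = some "code" <;> simp [h]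
      have e2 : (if ty ≠ some "code" ∧ (ty = some "table" ∨ ty = some "generic_table") then true else t)
          = (t || (decide (ty = some "table") || decide (ty = some "generic_table"))) := by
        by_cases h1 : ty = some "table" <;> by_cases h2 : ty = some "generic_table" <;>
          simp [h1, h2]
      have e3 : (if ty ≠ some "code" ∧ ¬(ty = some "table" ∨ ty = some "generic_table") ∧ ty = some "list" then true else l)
          = (l || decide (ty = some "list")) := by
        by_cases h : ty = some "list" <;> simp [h]
      have e4 : (if ty ≠ some "code" ∧ ¬(ty = some "table" ∨ ty = some "generic_table") ∧ ty ≠ some "list" ∧ ty = some "paragraph" then true else p)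
          = (p || decide (ty = some "paragraph")) := by
        by_cases h : ty = some "paragraph" <;> simp [h]
      simp only [e1, e2, e3, e4, hT]
      split_ifs with hall
      · simp only [Bool.and_eq_true] at hall
        obtain ⟨⟨⟨h1, h2⟩, h3⟩, h4⟩ := hall
        simp only [Prod.mk.injEq]
        refine ⟨?_, ?_, ?_, ?_⟩
        · rw [Bool.or_eq_true] at h1; rcases h1 with h | h <;> simp [h]
        · rw [Bool.or_eq_true] at h2; rcases h2 with h | h
          · simp [h]
          · rw [Bool.or_eq_true] at h; rcases h with h' | h' <;> simp [h']
        · rw [Bool.or_eq_true] at h3; rcases h3 with h | h <;> simp [h]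
        · rw [Bool.or_eq_true] at h4; rcases h4 with h | h <;> simp [h]
      · rw [ih]
        simp only [Prod.mk.injEq]
        refine ⟨?_, ?_, ?_, ?_⟩ <;>
          cases c <;> cases t <;> cases l <;> cases p <;>
            simp [Bool.or_assoc, Bool.or_comm, Bool.or_left_comm]

-- ===== VERDICT (by name: the statement is the Claim_ definition above) =====
theorem detect_structure_spec : Claim_equal_detect_structure := by
  intro content _
  unfold Spec_detect_structure detect_structure detect_structure_alt emptyStructureA
  by_cases h : content = []
  · simp [h]
  · simp only [h, if_false, detectLoopA_eq, any_table_split]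
    simp [hasTy]
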